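-- pv_equiv track=rewrite | github.com/aasthagupta01/Python_Upskilling | Beginner_Level_Assessment/Week-1/Alphanumeric_sorting/AlphanumericSorting.py | alphanumeric_sorting
-- ===== SOURCE A (Python) =====
-- class NotAlphanum(Exception):
--     """not an alphanumeric string"""
--     pass
--
-- def alphanumeric_sorting(alphanum: str) -> str:
--     try:
--         lower_alpha = []
--         upper_alpha = []
--         odd_digit = []
--         even_digit = []
--
--         for i in alphanum:
--             if i.isalnum():
--                 if i.isalpha():
--                     if i.islower():
--                         lower_alpha.append(i)
--
--                     elif i.isupper():
--                         upper_alpha.append(i)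
--
--                 if i.isdigit():
--                     if int(i) % 2 != 0:
--                         odd_digit.append(i)
--
--                     else:
--                         even_digit.append(i)
--
--             else:
--                 raise NotAlphanum
--
--         #sorting the above created lists
--         lower_alpha.sort()
--         upper_alpha.sort()
--         odd_digit.sort()
--         even_digit.sort()
--
--         #using join() method to convert list to string as well as join all the lists and returning the sorted string
--         sorted_str = ''.join(lower_alpha) + ''.join(upper_alpha) + ''.join(odd_digit) + ''.join(even_digit)
--         return sorted_str
--
--     except NotAlphanum:
--         return "not a valid alphanumeric string."
-- ===== SOURCE B (Python) =====
-- def alphanumeric_sorting(alphanum: str) -> str: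
--     # Counting sort over the fixed ASCII alphanumeric alphabet: one counting pass,
--     # then emit lowercase, uppercase, odd digits, even digits in fixed sorted order.
--     counts = [0] * 128
--     for ch in alphanum:
--         if not ch.isalnum():
--             return "not a valid alphanumeric string."
--         counts[ord(ch)] += 1
--     order = "abcdefghijklmnopqrstuvwxyzABCDEFGHIJKLMNOPQRSTUVWXYZ1357902468"
--     return ''.join(c * counts[ord(c)] for c in order)
-- ===== Notes on version B (the rewrite author's own statement) =====
-- stated objective: faster
-- what changed: Replaces the four bucket lists each comparison-sorted with a single counting pass over a 128-slot count array and an emit over the fixed 62-symbol alphabet (counting sort).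
import Mathlib
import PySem

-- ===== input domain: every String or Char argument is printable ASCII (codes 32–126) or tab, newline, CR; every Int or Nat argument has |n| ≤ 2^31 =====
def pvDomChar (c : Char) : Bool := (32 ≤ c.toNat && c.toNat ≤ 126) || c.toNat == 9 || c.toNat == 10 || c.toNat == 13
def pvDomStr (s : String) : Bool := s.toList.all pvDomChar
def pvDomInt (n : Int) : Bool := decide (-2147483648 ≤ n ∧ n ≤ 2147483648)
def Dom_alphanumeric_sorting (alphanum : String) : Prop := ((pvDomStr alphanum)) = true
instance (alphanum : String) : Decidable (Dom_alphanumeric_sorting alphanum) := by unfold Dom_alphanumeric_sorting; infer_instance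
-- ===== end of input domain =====

-- B replaces A's four comparison-sorted bucket lists by a single counting pass over a
-- 128-slot count array plus an emit over the fixed 62-symbol alphabet (counting sort).


-- ===== PORT A =====
-- A's for-loop: appends each char to one of four bucket lists; `none` = the
-- NotAlphanum exception raised at the first non-alphanumeric char.
-- `(i.toNat : Int) - 48` is int(i) for the ASCII digit i that reaches that branch (exact on Dom).
def pvLoopA : List Char → List Char → List Char → List Char → List Char →
    Option (List Char × List Char × List Char × List Char)
  | [], lo, up, od, ev => some (lo, up, od, ev)
  | i :: rest, lo, up, od, ev =>
    if PySem.Chars.isalnum i then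
      let p1 : List Char × List Char :=
        if PySem.Chars.isalpha i then
          if PySem.Chars.islower i then (lo ++ [i], up)
          else if PySem.Chars.isupper i then (lo, up ++ [i])
          else (lo, up)
        else (lo, up)
      let p2 : List Char × List Char :=
        if PySem.Chars.isdigit i then
          if PySem.Int.mod ((i.toNat : Int) - 48) 2 ≠ 0 then (od ++ [i], ev)
          else (od, ev ++ [i])
        else (od, ev)
      pvLoopA rest p1.1 p1.2 p2.1 p2.2
    else none

def alphanumeric_sorting (alphanum : String) : String :=
  match pvLoopA alphanum.toList [] [] [] [] with
  | none => "not a valid alphanumeric string."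
  | some (lo, up, od, ev) =>
      String.ofList (PySem.List.sorted lo (fun x => x) false ++ PySem.List.sorted up (fun x => x) false ++
                 PySem.List.sorted od (fun x => x) false ++ PySem.List.sorted ev (fun x => x) false)

-- ===== PORT B =====
-- B's counting pass: counts[ord(ch)] += 1; `none` = the early return on a non-alphanumeric char.
def pvLoopB : List Char → List Nat → Option (List Nat)
  | [], counts => some counts
  | ch :: rest, counts =>
    if PySem.Chars.isalnum ch then
      pvLoopB rest (counts.set ch.toNat (counts.getD ch.toNat 0 + 1))
    else none

def pvOrder : List Char := "abcdefghijklmnopqrstuvwxyzABCDEFGHIJKLMNOPQRSTUVWXYZ1357902468".toList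

def alphanumeric_sorting_alt (alphanum : String) : String :=
  match pvLoopB alphanum.toList (List.replicate 128 0) with
  | none => "not a valid alphanumeric string."
  | some counts => String.ofList (pvOrder.flatMap (fun c => List.replicate (counts.getD c.toNat 0) c))

-- ===== PRECONDITION & SPEC =====
def Spec_alphanumeric_sorting (alphanum : String) (out : String) : Prop := out = alphanumeric_sorting_alt alphanum
instance (alphanum : String) (out : String) : Decidable (Spec_alphanumeric_sorting alphanum out) := by unfold Spec_alphanumeric_sorting; infer_instance

-- ===== CLAIM (what is proved, stated in full; the proofs are below) =====
def Claim_equal_alphanumeric_sorting : Prop := ∀ (alphanum : String), Dom_alphanumeric_sorting alphanum → Spec_alphanumeric_sorting alphanum (alphanumeric_sorting alphanum)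

-- ===== LEMMAS AND PROOFS =====

-- the four branch tests of A's loop, as predicates on one char
def pvLow (c : Char) : Bool := PySem.Chars.isalpha c && PySem.Chars.islower c
def pvUp (c : Char) : Bool := PySem.Chars.isalpha c && !PySem.Chars.islower c && PySem.Chars.isupper c
def pvOdd (c : Char) : Bool := PySem.Chars.isdigit c && decide (PySem.Int.mod ((c.toNat : Int) - 48) 2 ≠ 0)
def pvEven (c : Char) : Bool := PySem.Chars.isdigit c && !decide (PySem.Int.mod ((c.toNat : Int) - 48) 2 ≠ 0)

-- the four segments of B's emit alphabet
def pvLowL : List Char := "abcdefghijklmnopqrstuvwxyz".toList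
def pvUpL : List Char := "ABCDEFGHIJKLMNOPQRSTUVWXYZ".toList
def pvOddL : List Char := "13579".toList
def pvEvenL : List Char := "02468".toList

lemma pvOrder_eq : pvOrder = pvLowL ++ pvUpL ++ pvOddL ++ pvEvenL := by decide

-- A's loop computes the four filters of the input (when every char is alphanumeric)
lemma pvLoopA_eq (cs : List Char) : ∀ lo up od ev, pvLoopA cs lo up od ev =
    if cs.all PySem.Chars.isalnum then
      some (lo ++ cs.filter pvLow, up ++ cs.filter pvUp, od ++ cs.filter pvOdd, ev ++ cs.filter pvEven)
    else none := by
  induction cs with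
  | nil => intro lo up od ev; simp [pvLoopA]
  | cons i rest ih =>
    intro lo up od ev
    simp only [pvLoopA, List.all_cons, List.filter_cons]
    by_cases han : PySem.Chars.isalnum i
    · simp only [han, Bool.true_and, if_pos, ih]
      by_cases hall : rest.all PySem.Chars.isalnum
      · simp only [hall, if_pos]
        unfold pvLow pvUp pvOdd pvEven
        by_cases ha : PySem.Chars.isalpha i <;>
          by_cases hl : PySem.Chars.islower i <;>
            by_cases hu : PySem.Chars.isupper i <;>
              by_cases hd : PySem.Chars.isdigit i <;>
                by_cases hm : PySem.Int.mod ((i.toNat : Int) - 48) 2 ≠ 0 <;>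
                  simp_all [List.append_assoc]
      · simp [hall]
    · simp [han]

-- B's loop is a fold of count increments (when every char is alphanumeric)
lemma pvLoopB_eq (cs : List Char) : ∀ counts, pvLoopB cs counts =
    if cs.all PySem.Chars.isalnum then
      some (cs.foldl (fun a ch => a.set ch.toNat (a.getD ch.toNat 0 + 1)) counts)
    else none := by
  induction cs with
  | nil => intro counts; simp [pvLoopB]
  | cons ch rest ih =>
    intro counts
    simp only [pvLoopB, List.all_cons, List.foldl_cons]
    by_cases h : PySem.Chars.isalnum ch
    · simp [h, ih]
    · simp [h]

lemma pvFoldCount (cs : List Char) : ∀ counts : List Nat, counts.length = 128 →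
    ∀ c : Char, c.toNat < 128 →
    (cs.foldl (fun a ch => a.set ch.toNat (a.getD ch.toNat 0 + 1)) counts).getD c.toNat 0
      = counts.getD c.toNat 0 + cs.count c := by
  induction cs with
  | nil => intro counts _ c _; simp
  | cons d rest ih =>
    intro counts hlen c hc
    simp only [List.foldl_cons]
    rw [ih _ (by simp [hlen]) c hc, List.count_cons]
    by_cases hdc : d = c
    · subst hdc
      have hlt : d.toNat < counts.length := by rw [hlen]; exact hc
      simp [List.getD, hlt]
      omega
    · have hne : d.toNat ≠ c.toNat := fun h => hdc (Char.ext (UInt32.toNat_inj.mp h))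
      simp [List.getD, List.getElem?_set_ne hne, hdc]

lemma pvCountExpand (al : List Char) (hnd : al.Nodup) (f : Char → Nat) (x : Char) :
    (al.flatMap fun c => List.replicate (f c) c).count x = if x ∈ al then f x else 0 := by
  induction hnd with
  | nil => simp
  | cons hna hnd ih =>
    rename_i a al
    simp only [List.flatMap_cons, List.count_append, List.count_replicate, List.mem_cons]
    rw [ih]
    by_cases hxa : x = a
    · subst hxa
      have hx : x ∉ al := fun h => hna x h rfl
      simp [hx]
    · simp [hxa, Ne.symm hxa]

lemma pvPairwiseExpand (al : List Char) (h : al.Pairwise (· < ·)) (f : Char → Nat) :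
    (al.flatMap fun c => List.replicate (f c) c).Pairwise (· ≤ ·) := by
  induction h with
  | nil => simp
  | cons hlt hpw ih =>
    rename_i a al
    simp only [List.flatMap_cons]
    rw [List.pairwise_append]
    refine ⟨List.pairwise_replicate.mpr (by simp), ih, ?_⟩
    intro x hx y hy
    rw [List.eq_of_mem_replicate hx]
    obtain ⟨c, hc, hyc⟩ := List.mem_flatMap.mp hy
    rw [List.eq_of_mem_replicate hyc]
    exact le_of_lt (hlt c hc)

lemma pvSortedExpand (xs al : List Char) (hpw : al.Pairwise (· < ·))
    (hsub : ∀ x ∈ xs, x ∈ al) :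
    PySem.List.sorted xs (fun x => x) false = al.flatMap (fun c => List.replicate (xs.count c) c) := by
  apply PySem.List.sorted_id_eq_of_perm_of_pairwise
  · rw [List.perm_iff_count]
    intro a
    rw [pvCountExpand al hpw.nodup _ a]
    split
    · rfl
    · exact (List.count_eq_zero.mpr (fun ha => ‹a ∉ al› (hsub a ha))).symm
  · exact pvPairwiseExpand al hpw (fun c => xs.count c)

lemma pvMemLowL (c : Char) : c ∈ pvLowL ↔ pvLow c = true := by
  constructor
  · intro h
    exact List.all_eq_true.mp (by decide : pvLowL.all pvLow = true) c h
  · intro h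
    have hl : PySem.Chars.islower c = true := by
      unfold pvLow at h; exact (Bool.and_eq_true_iff.mp h).2
    unfold PySem.Chars.islower at hl
    obtain ⟨h1, h2⟩ := Bool.and_eq_true_iff.mp hl
    have h1' : 97 ≤ c.toNat := by
      simpa only [Char.le_def, UInt32.le_iff_toNat_le] using of_decide_eq_true h1
    have h2' : c.toNat ≤ 122 := by
      simpa only [Char.le_def, UInt32.le_iff_toNat_le] using of_decide_eq_true h2
    have hc : Char.ofNat c.toNat = c := Char.ofNat_toNat c
    interval_cases hn : c.toNat <;> exact hc ▸ (by decide)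

lemma pvMemUpL (c : Char) : c ∈ pvUpL ↔ pvUp c = true := by
  constructor
  · intro h
    exact List.all_eq_true.mp (by decide : pvUpL.all pvUp = true) c h
  · intro h
    have hl : PySem.Chars.isupper c = true := by
      unfold pvUp at h; exact (Bool.and_eq_true_iff.mp h).2
    unfold PySem.Chars.isupper at hl
    obtain ⟨h1, h2⟩ := Bool.and_eq_true_iff.mp hl
    have h1' : 65 ≤ c.toNat := by
      simpa only [Char.le_def, UInt32.le_iff_toNat_le] using of_decide_eq_true h1
    have h2' : c.toNat ≤ 90 := by
      simpa only [Char.le_def, UInt32.le_iff_toNat_le] using of_decide_eq_true h2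
    have hc : Char.ofNat c.toNat = c := Char.ofNat_toNat c
    interval_cases hn : c.toNat <;> exact hc ▸ (by decide)

lemma pvDigitBounds (c : Char) (h : PySem.Chars.isdigit c = true) :
    48 ≤ c.toNat ∧ c.toNat ≤ 57 := by
  unfold PySem.Chars.isdigit at h
  obtain ⟨h1, h2⟩ := Bool.and_eq_true_iff.mp h
  constructor
  · simpa only [Char.le_def, UInt32.le_iff_toNat_le] using of_decide_eq_true h1
  · simpa only [Char.le_def, UInt32.le_iff_toNat_le] using of_decide_eq_true h2

lemma pvMemOddL (c : Char) : c ∈ pvOddL ↔ pvOdd c = true := by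
  constructor
  · intro h
    exact List.all_eq_true.mp (by decide : pvOddL.all pvOdd = true) c h
  · intro h
    obtain ⟨h1', h2'⟩ := pvDigitBounds c (by unfold pvOdd at h; exact (Bool.and_eq_true_iff.mp h).1)
    have hc : Char.ofNat c.toNat = c := Char.ofNat_toNat c
    interval_cases hn : c.toNat <;> · rw [← hc] at h ⊢; revert h; decide

lemma pvMemEvenL (c : Char) : c ∈ pvEvenL ↔ pvEven c = true := by
  constructor
  · intro h
    exact List.all_eq_true.mp (by decide : pvEvenL.all pvEven = true) c h
  · intro h
    obtain ⟨h1', h2'⟩ := pvDigitBounds c (by unfold pvEven at h; exact (Bool.and_eq_true_iff.mp h).1)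
    have hc : Char.ofNat c.toNat = c := Char.ofNat_toNat c
    interval_cases hn : c.toNat <;> · rw [← hc] at h ⊢; revert h; decide

-- one bucket: A's comparison sort of its filter = B's emit of the matching segment
lemma pvBucket (cs : List Char) (p : Char → Bool) (seg : List Char)
    (hpw : seg.Pairwise (· < ·)) (hmem : ∀ c, c ∈ seg ↔ p c = true)
    (counts : Char → Nat) (hcount : ∀ c ∈ seg, counts c = cs.count c) :
    PySem.List.sorted (cs.filter p) (fun x => x) false
      = seg.flatMap (fun c => List.replicate (counts c) c) := by
  rw [pvSortedExpand (cs.filter p) seg hpw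
      (fun x hx => (hmem x).mpr (List.of_mem_filter hx))]
  apply List.flatMap_congr
  intro c hc
  rw [List.count_filter ((hmem c).mp hc), hcount c hc]

-- ===== VERDICT (by name: the statement is the Claim_ definition above) =====
theorem alphanumeric_sorting_spec : Claim_equal_alphanumeric_sorting := by
  intro s _
  unfold Spec_alphanumeric_sorting alphanumeric_sorting alphanumeric_sorting_alt
  rw [pvLoopA_eq, pvLoopB_eq]
  by_cases hall : s.toList.all PySem.Chars.isalnum
  · rw [if_pos hall, if_pos hall]
    simp only [List.nil_append]
    have hcounts : ∀ c, c.toNat < 128 →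
        ((s.toList.foldl (fun a ch => a.set ch.toNat (a.getD ch.toNat 0 + 1))
          (List.replicate 128 0)).getD c.toNat 0) = s.toList.count c := by
      intro c hc
      rw [pvFoldCount _ _ (by simp) c hc]
      rw [List.getD_eq_getElem?_getD, List.getElem?_replicate]
      split <;> simp
    have hseg : ∀ seg : List Char, seg ⊆ pvOrder →
        ∀ c ∈ seg, ((s.toList.foldl (fun a ch => a.set ch.toNat (a.getD ch.toNat 0 + 1))
          (List.replicate 128 0)).getD c.toNat 0) = s.toList.count c := by
      intro seg hsub c hc
      exact hcounts c (List.all_eq_true.mp (by decide : pvOrder.all (fun c => decide (c.toNat < 128)) = true) c (hsub hc) |> of_decide_eq_true)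
    rw [pvOrder_eq]
    simp only [List.flatMap_append]
    have h1 := pvBucket s.toList pvLow pvLowL (by decide) pvMemLowL _
        (hseg pvLowL (by rw [pvOrder_eq]; intro x hx; simp [hx]))
    have h2 := pvBucket s.toList pvUp pvUpL (by decide) pvMemUpL _
        (hseg pvUpL (by rw [pvOrder_eq]; intro x hx; simp [hx]))
    have h3 := pvBucket s.toList pvOdd pvOddL (by decide) pvMemOddL _
        (hseg pvOddL (by rw [pvOrder_eq]; intro x hx; simp [hx]))
    have h4 := pvBucket s.toList pvEven pvEvenL (by decide) pvMemEvenL _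
        (hseg pvEvenL (by rw [pvOrder_eq]; intro x hx; simp [hx]))
    rw [h1, h2, h3, h4]
  · rw [if_neg hall, if_neg hall]
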